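-- pv_equiv track=rewrite | github.com/natbusa/datafaucet | datalabframework/metadata/resource.py | _get_resource_metadata
-- ===== SOURCE A (Python) =====
-- def _get_resource_metadata(metadata=dict(), resource=None, provider=None):
--
--     if 'resources' not in metadata.keys():
--         metadata['resources'] = {}
--
--     #first match by resource alias
--     rmd = metadata['resources'].get(resource, {})
--     if rmd:
--         rmd['alias'] = resource
--         if provider:
--             rmd['provider'] = provider
--         if not rmd.get('path'):
--             rmd['path'] = resource
--
--     # match resource not as alias but as a path in any of the available resources,
--     # using the given provider name and provider name
--     if not rmd:
--         for resource_alias in metadata['resources'].keys():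
--             resource_candidate = metadata['resources'][resource_alias]
--             if  resource_candidate.get('path') and resource_candidate.get('path') == resource and \
--                     resource_candidate.get('provider') and resource_candidate.get('provider') == provider:
--                 rmd = resource_candidate
--                 rmd['alias'] = resource_alias
--                 break
--
--     # if nothing yet, try with path alone
--     if not rmd:
--         for resource_alias in metadata['resources'].keys():
--             resource_candidate = metadata['resources'][resource_alias]
--             if resource_candidate.get('path') and resource_candidate.get('path') == resource:
--                 rmd = resource_candidate
--                 rmd['alias'] = resource_alias
--                 if provider:
--                     rmd['provider'] = provider
--                 break
--
--     #still nothing use path and provider as minimal resource info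
--     if not rmd:
--         if provider:
--             rmd['provider'] = provider
--
--         # if resource is given use it as a path
--         if resource:
--             rmd['path'] = resource
--
--     # nothing found, return None
--     return rmd
-- ===== SOURCE B (Python) =====
-- # B: same result via ONE pass over resources.items() tracking both the path+provider
-- # candidate (break on it) and the first path-only candidate, instead of A's two loops.
-- # Like A, mutates metadata in place (creates 'resources', mutates the chosen dict);
-- # the equivalence claimed is about the return value.
-- def _get_resource_metadata(metadata=dict(), resource=None, provider=None):
--     resources = metadata.setdefault('resources', {})
--
--     # alias lookup first
--     rmd = resources.get(resource, {})
--     if rmd: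
--         rmd['alias'] = resource
--         if provider:
--             rmd['provider'] = provider
--         if not rmd.get('path'):
--             rmd['path'] = resource
--         return rmd
--
--     # single scan: first path+provider match (break) and first path-only match
--     best = None
--     first_path = None
--     for alias, cand in resources.items():
--         p = cand.get('path')
--         if not p or p != resource:
--             continue
--         if first_path is None:
--             first_path = (alias, cand)
--         if cand.get('provider') and cand.get('provider') == provider:
--             best = (alias, cand)
--             break
--
--     if best is not None:
--         alias, rmd = best
--         rmd['alias'] = alias
--     elif first_path is not None:
--         alias, rmd = first_path
--         rmd['alias'] = alias
--         if provider:
--             rmd['provider'] = provider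
--     else:
--         rmd = {}
--         if provider:
--             rmd['provider'] = provider
--         if resource:
--             rmd['path'] = resource
--     return rmd
-- ===== Notes on version B (the rewrite author's own statement) =====
-- stated objective: alternative
-- what changed: A's two sequential for-loops over the alias keys (path+provider pass, then a full path-only re-scan) are replaced by one pass over resources.items() that tracks the first path+provider candidate (breaking on it) and the first path-only candidate simultaneously, choosing between them after the loop; B also drops the repeated dict lookups by iterating items() directly.
import Mathlib
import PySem

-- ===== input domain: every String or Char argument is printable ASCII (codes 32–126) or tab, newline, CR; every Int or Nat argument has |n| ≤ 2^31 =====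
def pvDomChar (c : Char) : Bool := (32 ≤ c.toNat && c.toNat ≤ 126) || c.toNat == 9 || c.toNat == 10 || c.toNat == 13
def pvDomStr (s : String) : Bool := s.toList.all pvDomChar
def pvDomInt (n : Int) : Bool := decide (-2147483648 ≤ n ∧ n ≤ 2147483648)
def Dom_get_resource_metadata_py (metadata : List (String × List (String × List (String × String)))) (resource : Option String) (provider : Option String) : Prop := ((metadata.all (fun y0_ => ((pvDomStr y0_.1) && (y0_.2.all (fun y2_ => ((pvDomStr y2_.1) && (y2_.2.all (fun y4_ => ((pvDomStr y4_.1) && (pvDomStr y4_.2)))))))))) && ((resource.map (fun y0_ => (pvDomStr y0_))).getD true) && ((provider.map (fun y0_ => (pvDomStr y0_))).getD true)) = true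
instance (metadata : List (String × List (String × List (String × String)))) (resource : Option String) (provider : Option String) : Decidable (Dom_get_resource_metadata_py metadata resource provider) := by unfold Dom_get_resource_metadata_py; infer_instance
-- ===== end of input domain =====

-- B (alternative, same cost): one pass over resources.items() tracking both the first path+provider
-- candidate and the first path-only candidate, instead of A's two key-loops with per-step dict lookups.
-- Python A mutates its metadata argument in place (B mutates likewise); the equivalence proved here is
-- about the RETURN value only.
-- ===== PORT A =====
-- dict helpers shared by both ports (generic Python-dict operations, via PySem.Dict)
def pvGet? {v : Type} (l : List (String × v)) (k : String) : Option v :=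
  (PySem.Dict.mk l).get? k

def pvIns {v : Type} (l : List (String × v)) (k : String) (x : v) : List (String × v) :=
  ((PySem.Dict.mk l).insert k x).items

def pvKeys {v : Type} (l : List (String × v)) : List String :=
  (PySem.Dict.mk l).keys

-- Python truthiness of an optional string (None and '' are falsy)
def pvTruthy : Option String → Bool
  | some s => s ≠ ""
  | none => false

-- candidate.get('path') and candidate.get('path') == resource
def pvPathOk (c : List (String × String)) (resource : Option String) : Bool :=
  match pvGet? c "path" with
  | some p => p ≠ "" && some p == resource
  | none => false

-- candidate.get('provider') and candidate.get('provider') == provider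
def pvProvOk (c : List (String × String)) (provider : Option String) : Bool :=
  match pvGet? c "provider" with
  | some q => q ≠ "" && some q == provider
  | none => false

-- A, first for-loop: match by path AND provider over the alias keys
def pvLoopPP (resources : List (String × List (String × String))) (resource provider : Option String) :
    List String → Option (List (String × String))
  | [] => none
  | a :: rest =>
    let c := (pvGet? resources a).getD []
    if pvPathOk c resource && pvProvOk c provider then
      some (pvIns c "alias" a)
    else pvLoopPP resources resource provider rest

-- A, second for-loop: match by path alone over the alias keys
def pvLoopP (resources : List (String × List (String × String))) (resource provider : Option String) :
    List String → Option (List (String × String))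
  | [] => none
  | a :: rest =>
    let c := (pvGet? resources a).getD []
    if pvPathOk c resource then
      let rmd := pvIns c "alias" a
      some (if pvTruthy provider then pvIns rmd "provider" (provider.getD "") else rmd)
    else pvLoopP resources resource provider rest

def get_resource_metadata_py (metadata : List (String × List (String × List (String × String)))) (resource : Option String) (provider : Option String) : List (String × String) :=
  let metadata := if "resources" ∈ pvKeys metadata then metadata else pvIns metadata "resources" []
  let resources := (pvGet? metadata "resources").getD []
  let rmd0 := match resource with
    | some r => (pvGet? resources r).getD []
    | none => []
  if rmd0 ≠ [] then
    -- rmd0 nonempty forces resource = some r: Python's rmd['alias'] = resource stores that string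
    let r := resource.getD ""
    let rmd := pvIns rmd0 "alias" r
    let rmd := if pvTruthy provider then pvIns rmd "provider" (provider.getD "") else rmd
    if pvTruthy (pvGet? rmd "path") then rmd else pvIns rmd "path" r
  else
    match pvLoopPP resources resource provider (pvKeys resources) with
    | some rmd => rmd
    | none =>
      match pvLoopP resources resource provider (pvKeys resources) with
      | some rmd => rmd
      | none =>
        let rmd : List (String × String) := []
        let rmd := if pvTruthy provider then pvIns rmd "provider" (provider.getD "") else rmd
        match resource with
        | some r => if r ≠ "" then pvIns rmd "path" r else rmd
        | none => rmd

-- ===== PORT B =====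
-- B, single scan over resources.items(): .1 = first path+provider match (break there), .2 = first path-only match
def pvScan (resource provider : Option String) :
    List (String × List (String × String)) → Option (String × List (String × String)) →
    Option (String × List (String × String)) × Option (String × List (String × String))
  | [], fp => (none, fp)
  | (a, c) :: rest, fp =>
    if pvPathOk c resource then
      let fp := match fp with | none => some (a, c) | some x => some x
      if pvProvOk c provider then (some (a, c), fp)
      else pvScan resource provider rest fp
    else pvScan resource provider rest fp

def get_resource_metadata_py_alt (metadata : List (String × List (String × List (String × String)))) (resource : Option String) (provider : Option String) : List (String × String) :=
  let resources := (pvGet? metadata "resources").getD []   -- setdefault: existing value, or the fresh {}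
  let rmd0 := match resource with
    | some r => (pvGet? resources r).getD []
    | none => []
  if rmd0 ≠ [] then
    let r := resource.getD ""   -- rmd0 nonempty forces resource = some r
    let rmd := pvIns rmd0 "alias" r
    let rmd := if pvTruthy provider then pvIns rmd "provider" (provider.getD "") else rmd
    if pvTruthy (pvGet? rmd "path") then rmd else pvIns rmd "path" r
  else
    match pvScan resource provider resources none with
    | (some (a, c), _) => pvIns c "alias" a
    | (none, some (a, c)) =>
      let rmd := pvIns c "alias" a
      if pvTruthy provider then pvIns rmd "provider" (provider.getD "") else rmd
    | (none, none) =>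
      let rmd : List (String × String) := []
      let rmd := if pvTruthy provider then pvIns rmd "provider" (provider.getD "") else rmd
      match resource with
      | some r => if r ≠ "" then pvIns rmd "path" r else rmd
      | none => rmd

-- ===== PRECONDITION & SPEC =====
-- Pre_ requires every association list standing for a Python dict to have pairwise-distinct keys:
-- a list with duplicate keys represents no Python dict at all (Python A can never receive one),
-- so nothing is claimed there.
def Pre_get_resource_metadata_py (metadata : List (String × List (String × List (String × String)))) (_resource : Option String) (_provider : Option String) : Prop :=
  (metadata.map Prod.fst).Nodup ∧
  ∀ p ∈ metadata, (p.2.map Prod.fst).Nodup ∧ ∀ q ∈ p.2, (q.2.map Prod.fst).Nodup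

instance (metadata : List (String × List (String × List (String × String)))) (resource : Option String) (provider : Option String) : Decidable (Pre_get_resource_metadata_py metadata resource provider) := by unfold Pre_get_resource_metadata_py; infer_instance

def pvWitness_get_resource_metadata_py : (List (String × List (String × List (String × String)))) × Option String × Option String :=
  ([("resources", [("a1", [("path", "p1"), ("provider", "pr")])])], some "p1", some "pr")

def Spec_get_resource_metadata_py (metadata : List (String × List (String × List (String × String)))) (resource : Option String) (provider : Option String) (out : List (String × String)) : Prop := out = get_resource_metadata_py_alt metadata resource provider
instance (metadata : List (String × List (String × List (String × String)))) (resource : Option String) (provider : Option String) (out : List (String × String)) : Decidable (Spec_get_resource_metadata_py metadata resource provider out) := by unfold Spec_get_resource_metadata_py; infer_instance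

-- ===== CLAIM (what is proved, stated in full; the proofs are below) =====
def Claim_equal_get_resource_metadata_py : Prop := ∀ (metadata : List (String × List (String × List (String × String)))) (resource : Option String) (provider : Option String), Dom_get_resource_metadata_py metadata resource provider → Pre_get_resource_metadata_py metadata resource provider → Spec_get_resource_metadata_py metadata resource provider (get_resource_metadata_py metadata resource provider)

-- ===== LEMMAS AND PROOFS =====

theorem pvKeys_eq {v : Type} (l : List (String × v)) : pvKeys l = l.map Prod.fst := rfl

-- A's 'resources' default-insertion does not change the value subsequently read back
theorem pv_resources_eq (metadata : List (String × List (String × List (String × String)))) :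
    (pvGet? (if "resources" ∈ pvKeys metadata then metadata else pvIns metadata "resources" []) "resources").getD []
      = (pvGet? metadata "resources").getD [] := by
  by_cases h : "resources" ∈ pvKeys metadata
  · simp [h]
  · have hins : pvGet? (pvIns metadata "resources" ([] : List (String × List (String × String)))) "resources"
        = some [] := by
      show ((PySem.Dict.mk metadata).insert "resources" []).get? "resources" = some []
      exact PySem.Dict.get?_insert_self _ _ _
    have hnone : pvGet? metadata "resources" = (none : Option (List (String × List (String × String)))) := by
      show (PySem.Dict.mk metadata).get? "resources" = none
      rw [PySem.Dict.get?_eq_none_iff_not_mem_keys]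
      simpa [pvKeys] using h
    rw [if_neg h, hins, hnone]
    rfl

-- with distinct keys, a lookup by a key of a member pair returns that pair's value
theorem pv_get?_of_mem {v : Type} (l : List (String × v)) (x : String × v)
    (hm : x ∈ l) (hnd : (l.map Prod.fst).Nodup) : pvGet? l x.1 = some x.2 := by
  have : (PySem.Dict.mk l).get? x.1 = some x.2 := by
    apply PySem.Dict.get?_of_mem_items
    · simpa using hm
    · simpa [PySem.Dict.keys] using hnd
  simpa [pvGet?] using this

-- A's first loop over the alias keys is the first path+provider match of the items list
theorem pv_loopPP_eq (resources : List (String × List (String × String)))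
    (r p : Option String) (hnd : (resources.map Prod.fst).Nodup)
    (l : List (String × List (String × String))) (hsub : ∀ x ∈ l, x ∈ resources) :
    pvLoopPP resources r p (l.map Prod.fst)
      = (l.find? (fun x => pvPathOk x.2 r && pvProvOk x.2 p)).map (fun x => pvIns x.2 "alias" x.1) := by
  induction l with
  | nil => simp [pvLoopPP]
  | cons x t ih =>
    have hx : pvGet? resources x.1 = some x.2 :=
      pv_get?_of_mem resources x (hsub x (by simp)) hnd
    by_cases hc : (pvPathOk x.2 r && pvProvOk x.2 p) = true
    · simp [pvLoopPP, hx, hc, List.find?]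
    · simp [pvLoopPP, hx, hc, List.find?, ih (fun y hy => hsub y (by simp [hy]))]

-- A's second loop over the alias keys is the first path-only match of the items list
theorem pv_loopP_eq (resources : List (String × List (String × String)))
    (r p : Option String) (hnd : (resources.map Prod.fst).Nodup)
    (l : List (String × List (String × String))) (hsub : ∀ x ∈ l, x ∈ resources) :
    pvLoopP resources r p (l.map Prod.fst)
      = (l.find? (fun x => pvPathOk x.2 r)).map (fun x =>
          let rmd := pvIns x.2 "alias" x.1
          if pvTruthy p then pvIns rmd "provider" (p.getD "") else rmd) := by
  induction l with
  | nil => simp [pvLoopP]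
  | cons x t ih =>
    have hx : pvGet? resources x.1 = some x.2 :=
      pv_get?_of_mem resources x (hsub x (by simp)) hnd
    by_cases hc : pvPathOk x.2 r = true
    · simp [pvLoopP, hx, hc, List.find?]
    · simp [pvLoopP, hx, hc, List.find?, ih (fun y hy => hsub y (by simp [hy]))]

-- B's scan, first component: the first path+provider match, independent of the carried candidate
theorem pv_scan_fst (r p : Option String) (l : List (String × List (String × String)))
    (fp : Option (String × List (String × String))) :
    (pvScan r p l fp).1 = l.find? (fun x => pvPathOk x.2 r && pvProvOk x.2 p) := by
  induction l generalizing fp with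
  | nil => simp [pvScan]
  | cons x t ih =>
    obtain ⟨a, c⟩ := x
    by_cases hp : pvPathOk c r = true
    · by_cases hq : pvProvOk c p = true
      · simp [pvScan, hp, hq, List.find?]
      · simp [pvScan, hp, hq, List.find?, ih]
    · simp [pvScan, hp, List.find?, ih]

-- B's scan, second component when no path+provider match exists: the carried candidate, else the first path match
theorem pv_scan_snd (r p : Option String) (l : List (String × List (String × String)))
    (fp : Option (String × List (String × String)))
    (h : l.find? (fun x => pvPathOk x.2 r && pvProvOk x.2 p) = none) :
    (pvScan r p l fp).2
      = (match fp with | some x => some x | none => l.find? (fun x => pvPathOk x.2 r)) := by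
  induction l generalizing fp with
  | nil => cases fp <;> simp [pvScan]
  | cons x t ih =>
    obtain ⟨a, c⟩ := x
    rw [List.find?] at h
    by_cases hp : pvPathOk c r = true
    · have hq : pvProvOk c p ≠ true := by
        intro hq
        simp [hp, hq] at h
      have h' : t.find? (fun x => pvPathOk x.2 r && pvProvOk x.2 p) = none := by
        simpa [hp, hq] using h
      cases fp with
      | none => simp [pvScan, hp, hq, ih _ h', List.find?]
      | some y => simp [pvScan, hp, hq, ih _ h']
    · have h' : t.find? (fun x => pvPathOk x.2 r && pvProvOk x.2 p) = none := by
        simpa [hp] using h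
      cases fp <;> simp [pvScan, hp, ih _ h', List.find?]

-- ===== VERDICT (by name: the statement is the Claim_ definition above) =====
theorem get_resource_metadata_py_spec : Claim_equal_get_resource_metadata_py := by
  intro metadata resource provider _hdom hpre
  unfold Spec_get_resource_metadata_py
  simp only [get_resource_metadata_py, get_resource_metadata_py_alt]
  rw [pv_resources_eq]
  set resources := (pvGet? metadata "resources").getD [] with hres
  have hnd : (resources.map Prod.fst).Nodup := by
    rcases hget : (PySem.Dict.mk metadata).get? "resources" with _ | v
    · simp [hres, pvGet?, hget]
    · have hmem : ("resources", v) ∈ metadata := by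
        simpa using PySem.Dict.mem_items_of_get?_eq_some (PySem.Dict.mk metadata) hget
      have := (hpre.2 _ hmem).1
      simpa [hres, pvGet?, hget] using this
  set rmd0 := (match resource with
    | some r => (pvGet? resources r).getD []
    | none => ([] : List (String × String))) with hrmd0
  by_cases h0 : rmd0 ≠ []
  · simp [h0]
  · rw [if_neg h0, if_neg h0, pvKeys_eq,
        pv_loopPP_eq resources resource provider hnd resources (fun x hx => hx),
        pv_loopP_eq resources resource provider hnd resources (fun x hx => hx)]
    have hs1 := pv_scan_fst resource provider resources none
    rcases hf : resources.find? (fun x => pvPathOk x.2 resource && pvProvOk x.2 provider) with _ | ⟨a, c⟩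
    · have hs2 : (pvScan resource provider resources none).2
          = resources.find? (fun x => pvPathOk x.2 resource) := by
        simpa using pv_scan_snd resource provider resources none hf
      have hs : pvScan resource provider resources none
          = (none, resources.find? (fun x => pvPathOk x.2 resource)) :=
        Prod.ext_iff.mpr ⟨by rw [hs1, hf], hs2⟩
      rw [hf, hs]
      rcases hg : resources.find? (fun x => pvPathOk x.2 resource) with _ | ⟨a, c⟩ <;> simp [hg]
    · have hs : pvScan resource provider resources none
          = (some (a, c), (pvScan resource provider resources none).2) :=
        Prod.ext_iff.mpr ⟨by rw [hs1, hf], rfl⟩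
      rw [hf, hs]
      simp
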